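-- pv_equiv track=rewrite | github.com/CharithL/Movie-Emotion- | exploration/patient_inventory.py | classify_neuron_region
-- ===== SOURCE A (Python) =====
-- INPUT_REGIONS = {
--     'amygdala': ['Left amygdala', 'Right amygdala'],
--     'hippocampus': ['Left hippocampus', 'Right hippocampus']
-- }
--
-- OUTPUT_REGIONS = {
--     'ACC': ['Left ACC', 'Right ACC'],
--     'preSMA': ['Left preSMA', 'Right preSMA'],
--     'vmPFC': ['Left vmPFC', 'Right vmPFC']
-- }
--
-- def classify_neuron_region(region_label):
--     """Map a neuron's region label to canonical grouping."""
--     for group_name, labels in INPUT_REGIONS.items():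
--         if region_label in labels:
--             return 'input', group_name
--     for group_name, labels in OUTPUT_REGIONS.items():
--         if region_label in labels:
--             return 'output', group_name
--     return 'other', region_label
-- ===== SOURCE B (Python) =====
-- INPUT_REGIONS = {
--     'amygdala': ['Left amygdala', 'Right amygdala'],
--     'hippocampus': ['Left hippocampus', 'Right hippocampus']
-- }
--
-- OUTPUT_REGIONS = {
--     'ACC': ['Left ACC', 'Right ACC'],
--     'preSMA': ['Left preSMA', 'Right preSMA'],
--     'vmPFC': ['Left vmPFC', 'Right vmPFC']
-- }
--
-- # Flat reverse-lookup table built once at import time.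
-- _REGION_LOOKUP = {}
-- for _type, _regions in (('input', INPUT_REGIONS), ('output', OUTPUT_REGIONS)):
--     for _group, _labels in _regions.items():
--         for _label in _labels:
--             _REGION_LOOKUP[_label] = (_type, _group)
--
-- def classify_neuron_region(region_label):
--     """Map a neuron's region label to canonical grouping."""
--     return _REGION_LOOKUP.get(region_label, ('other', region_label))
-- ===== Notes on version B (the rewrite author's own statement) =====
-- stated objective: simpler
-- what changed: Replaced the two sequential scan loops over INPUT_REGIONS and OUTPUT_REGIONS by a flat reverse-lookup dict built once at import time; the function body collapses to a single dict .get with ('other', region_label) as default.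
import Mathlib
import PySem

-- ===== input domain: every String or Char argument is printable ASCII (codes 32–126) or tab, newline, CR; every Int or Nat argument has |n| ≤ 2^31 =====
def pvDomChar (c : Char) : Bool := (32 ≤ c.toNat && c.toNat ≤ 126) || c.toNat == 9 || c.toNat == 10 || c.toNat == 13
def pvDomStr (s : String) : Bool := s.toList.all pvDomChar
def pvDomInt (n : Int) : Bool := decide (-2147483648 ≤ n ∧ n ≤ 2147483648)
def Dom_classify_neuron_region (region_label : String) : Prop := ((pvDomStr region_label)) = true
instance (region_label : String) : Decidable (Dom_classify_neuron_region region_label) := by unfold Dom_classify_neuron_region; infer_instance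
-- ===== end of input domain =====

-- B replaces A's two sequential scan loops with one flat reverse-lookup table built once; simpler function body.


-- ===== PORT A =====
-- module constants (shared by both programs)
def pvINPUT_REGIONS : List (String × List String) :=
  [("amygdala", ["Left amygdala", "Right amygdala"]),
   ("hippocampus", ["Left hippocampus", "Right hippocampus"])]

def pvOUTPUT_REGIONS : List (String × List String) :=
  [("ACC", ["Left ACC", "Right ACC"]),
   ("preSMA", ["Left preSMA", "Right preSMA"]),
   ("vmPFC", ["Left vmPFC", "Right vmPFC"])]

-- A's 'for group_name, labels in R.items(): if region_label in labels: return …'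
def pvScanA (region_label : String) : List (String × List String) → Option String
  | [] => none
  | (group_name, labels) :: rest =>
    if labels.contains region_label then some group_name
    else pvScanA region_label rest

def classify_neuron_region (region_label : String) : String × String :=
  match pvScanA region_label pvINPUT_REGIONS with
  | some g => ("input", g)
  | none =>
    match pvScanA region_label pvOUTPUT_REGIONS with
    | some g => ("output", g)
    | none => ("other", region_label)

-- ===== PORT B =====
-- flat reverse-lookup table built once (B's import-time triple loop)
def pvREGION_LOOKUP : PySem.Dict String (String × String) :=
  ([("input", pvINPUT_REGIONS), ("output", pvOUTPUT_REGIONS)]).foldl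
    (fun d tr =>
      tr.2.foldl
        (fun d gl => gl.2.foldl (fun d lb => d.insert lb (tr.1, gl.1)) d) d)
    (PySem.Dict.empty)

def classify_neuron_region_alt (region_label : String) : String × String :=
  PySem.Dict.getD pvREGION_LOOKUP region_label ("other", region_label)

-- ===== PRECONDITION & SPEC =====
def Spec_classify_neuron_region (region_label : String) (out : String × String) : Prop := out = classify_neuron_region_alt region_label
instance (region_label : String) (out : String × String) : Decidable (Spec_classify_neuron_region region_label out) := by unfold Spec_classify_neuron_region; infer_instance

-- ===== CLAIM (what is proved, stated in full; the proofs are below) =====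
def Claim_equal_classify_neuron_region : Prop := ∀ (region_label : String), Dom_classify_neuron_region region_label → Spec_classify_neuron_region region_label (classify_neuron_region region_label)

-- ===== LEMMAS AND PROOFS =====
-- the flat table, fully evaluated
theorem pvREGION_LOOKUP_eval : pvREGION_LOOKUP = PySem.Dict.mk
    [("Left amygdala", ("input", "amygdala")), ("Right amygdala", ("input", "amygdala")),
     ("Left hippocampus", ("input", "hippocampus")), ("Right hippocampus", ("input", "hippocampus")),
     ("Left ACC", ("output", "ACC")), ("Right ACC", ("output", "ACC")),
     ("Left preSMA", ("output", "preSMA")), ("Right preSMA", ("output", "preSMA")),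
     ("Left vmPFC", ("output", "vmPFC")), ("Right vmPFC", ("output", "vmPFC"))] := by decide

-- ===== VERDICT (by name: the statement is the Claim_ definition above) =====
theorem classify_neuron_region_spec : Claim_equal_classify_neuron_region := by
  intro l _
  unfold Spec_classify_neuron_region
  by_cases h1 : l = "Left amygdala"; · subst h1; decide
  by_cases h2 : l = "Right amygdala"; · subst h2; decide
  by_cases h3 : l = "Left hippocampus"; · subst h3; decide
  by_cases h4 : l = "Right hippocampus"; · subst h4; decide
  by_cases h5 : l = "Left ACC"; · subst h5; decide
  by_cases h6 : l = "Right ACC"; · subst h6; decide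
  by_cases h7 : l = "Left preSMA"; · subst h7; decide
  by_cases h8 : l = "Right preSMA"; · subst h8; decide
  by_cases h9 : l = "Left vmPFC"; · subst h9; decide
  by_cases h10 : l = "Right vmPFC"; · subst h10; decide
  simp [classify_neuron_region, classify_neuron_region_alt, pvScanA,
        pvINPUT_REGIONS, pvOUTPUT_REGIONS, pvREGION_LOOKUP_eval,
        PySem.Dict.getD, PySem.Dict.get?, List.find?,
        h1, h2, h3, h4, h5, h6, h7, h8, h9, h10,
        beq_eq_false_iff_ne.mpr (Ne.symm h1), beq_eq_false_iff_ne.mpr (Ne.symm h2),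
        beq_eq_false_iff_ne.mpr (Ne.symm h3), beq_eq_false_iff_ne.mpr (Ne.symm h4),
        beq_eq_false_iff_ne.mpr (Ne.symm h5), beq_eq_false_iff_ne.mpr (Ne.symm h6),
        beq_eq_false_iff_ne.mpr (Ne.symm h7), beq_eq_false_iff_ne.mpr (Ne.symm h8),
        beq_eq_false_iff_ne.mpr (Ne.symm h9), beq_eq_false_iff_ne.mpr (Ne.symm h10)]
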